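-- pv_equiv track=rewrite | github.com/Srar-Git/SR-ANT | algorithm/int-path.py | genSpineLeaf
-- ===== SOURCE A (Python) =====
-- def genSpineLeaf(swSum):  #SNum must be 3,6,9,12,15...
--     L1 = int(swSum/3)
--     L2 = L1*2
--
--     topoList = [[0 for i in range(swSum)] for i in range(swSum)]
--
--     for i in range(L1):
--         for j in range(L1, swSum):
--             topoList[i][j] = 1
--             topoList[j][i] = 1
--
--     return topoList
-- ===== SOURCE B (Python) =====
-- def genSpineLeaf(swSum):  #SNum must be 3,6,9,12,15...
--     L1 = int(swSum/3)
--     spine = [0] * L1 + [1] * (swSum - L1)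
--     leaf = [1] * L1 + [0] * (swSum - L1)
--     return [list(spine) if i < L1 else list(leaf) for i in range(swSum)]
-- ===== Notes on version B (the rewrite author's own statement) =====
-- stated objective: simpler
-- what changed: Replaces zero-initialisation followed by a double loop flipping symmetric entries with direct per-row block construction: each row is a precomputed spine or leaf block row chosen by the row index.
import Mathlib
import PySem

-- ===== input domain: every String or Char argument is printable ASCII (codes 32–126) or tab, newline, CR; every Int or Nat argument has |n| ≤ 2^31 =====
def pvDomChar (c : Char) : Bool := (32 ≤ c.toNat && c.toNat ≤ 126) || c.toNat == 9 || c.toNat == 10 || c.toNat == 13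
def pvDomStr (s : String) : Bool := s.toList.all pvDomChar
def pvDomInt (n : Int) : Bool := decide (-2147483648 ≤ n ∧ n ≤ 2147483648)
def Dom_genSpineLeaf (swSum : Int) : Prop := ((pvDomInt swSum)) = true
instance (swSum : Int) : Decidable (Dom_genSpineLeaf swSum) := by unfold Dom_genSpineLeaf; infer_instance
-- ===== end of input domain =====

-- B builds each row directly as a spine/leaf block row instead of A's zero-init plus
-- symmetric double-loop flipping; same O(n^2) cost, simpler shape. Return value only.

-- ===== PORT A =====
-- int(swSum/3): float division then truncation; exact = Int.tdiv on |swSum| ≤ 2^31 (< 2^53)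
def genSpineLeaf (swSum : Int) : List (List Int) :=
  let L1 := PySem.Int.truncdiv swSum 3
  let _L2 := L1 * 2
  let topoList : List (List Int) :=
    (PySem.List.pyRange 0 swSum 1).map (fun _ => (PySem.List.pyRange 0 swSum 1).map (fun _ => (0 : Int)))
  let topoList :=
    (PySem.List.pyRange 0 L1 1).foldl (fun m i =>
      (PySem.List.pyRange L1 swSum 1).foldl (fun m j =>
        -- topoList[i][j] = 1
        let m := PySem.List.pySetD m i (PySem.List.pySetD (PySem.List.pyGetD m i []) j 1)
        -- topoList[j][i] = 1
        PySem.List.pySetD m j (PySem.List.pySetD (PySem.List.pyGetD m j []) i 1)) m) topoList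
  topoList

-- ===== PORT B =====
def genSpineLeaf_alt (swSum : Int) : List (List Int) :=
  let L1 := PySem.Int.truncdiv swSum 3
  let spine : List Int := List.replicate L1.toNat 0 ++ List.replicate (swSum - L1).toNat 1
  let leaf  : List Int := List.replicate L1.toNat 1 ++ List.replicate (swSum - L1).toNat 0
  (PySem.List.pyRange 0 swSum 1).map (fun i => if i < L1 then spine else leaf)

-- ===== PRECONDITION & SPEC =====
def Spec_genSpineLeaf (swSum : Int) (out : List (List Int)) : Prop := out = genSpineLeaf_alt swSum
instance (swSum : Int) (out : List (List Int)) : Decidable (Spec_genSpineLeaf swSum out) := by unfold Spec_genSpineLeaf; infer_instance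

-- ===== CLAIM (what is proved, stated in full; the proofs are below) =====
def Claim_equal_genSpineLeaf : Prop := ∀ (swSum : Int), Dom_genSpineLeaf swSum → Spec_genSpineLeaf swSum (genSpineLeaf swSum)

-- ===== LEMMAS AND PROOFS =====

-- the matrix whose (p,q) entry is f p q, for p,q ∈ range(n)
def pvMat (n : Int) (f : Int → Int → Int) : List (List Int) :=
  (PySem.List.pyRange 0 n 1).map (fun p => (PySem.List.pyRange 0 n 1).map (f p))

theorem pvMat_congr (n : Int) (f g : Int → Int → Int)
    (h : ∀ p q, 0 ≤ p → p < n → 0 ≤ q → q < n → f p q = g p q) : pvMat n f = pvMat n g := by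
  unfold pvMat
  refine List.map_congr_left (fun p hp => ?_)
  rw [PySem.List.mem_pyRange_one] at hp
  refine List.map_congr_left (fun q hq => ?_)
  rw [PySem.List.mem_pyRange_one] at hq
  exact h p q hp.1 hp.2 hq.1 hq.2

theorem pvSet_map_pyRange {α : Type} (n : Int) (g : Int → α) (b : Int) (v : α)
    (hb0 : 0 ≤ b) :
    PySem.List.pySetD ((PySem.List.pyRange 0 n 1).map g) b v
      = (PySem.List.pyRange 0 n 1).map (fun q => if q = b then v else g q) := by
  rw [PySem.List.pySetD_of_nonneg _ _ hb0]
  apply List.ext_getElem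
  · simp
  · intro k h1 h2
    simp only [List.length_set, List.length_map, PySem.List.length_pyRange_one] at h1
    simp only [List.getElem_set, List.getElem_map, PySem.List.getElem_pyRange_one]
    by_cases hk : k = b.toNat
    · rw [if_pos (by omega), if_pos (by omega)]
    · rw [if_neg (by omega), if_neg (by omega)]

-- effect of one Python statement pair m[a][b] = v on a matrix in pvMat form
theorem pvStep_mat (n : Int) (f : Int → Int → Int) (a b v : Int)
    (ha0 : 0 ≤ a) (han : a < n) (hb0 : 0 ≤ b) :
    PySem.List.pySetD (pvMat n f) a
        (PySem.List.pySetD (PySem.List.pyGetD (pvMat n f) a []) b v)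
      = pvMat n (fun p q => if p = a ∧ q = b then v else f p q) := by
  unfold pvMat
  rw [PySem.List.pyGetD_map_pyRange_of_nonneg _ _ _ _ ha0 han]
  rw [pvSet_map_pyRange n (f a) b v hb0]
  rw [pvSet_map_pyRange n _ a _ ha0]
  refine List.map_congr_left (fun p _ => ?_)
  by_cases hp : p = a
  · subst hp
    rw [if_pos rfl]
    refine List.map_congr_left (fun q _ => ?_)
    by_cases hq : q = b <;> simp [hq]
  · simp only [if_neg hp]
    refine List.map_congr_left (fun q _ => ?_)
    simp [hp]

theorem pvInner (n i : Int) (js : List Int) (f : Int → Int → Int)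
    (hi0 : 0 ≤ i) (hin : i < n) (hjs : ∀ j ∈ js, 0 ≤ j ∧ j < n) :
    js.foldl (fun m j =>
        let m := PySem.List.pySetD m i (PySem.List.pySetD (PySem.List.pyGetD m i []) j 1)
        PySem.List.pySetD m j (PySem.List.pySetD (PySem.List.pyGetD m j []) i 1)) (pvMat n f)
      = pvMat n (fun p q => if (p = i ∧ q ∈ js) ∨ (q = i ∧ p ∈ js) then 1 else f p q) := by
  induction js generalizing f with
  | nil => simp [pvMat]
  | cons j0 js ih =>
      obtain ⟨hj0, hj0n⟩ := hjs j0 (by simp)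
      simp only [List.foldl_cons]
      rw [pvStep_mat n f i j0 1 hi0 hin hj0]
      rw [pvStep_mat n _ j0 i 1 hj0 hj0n hi0]
      rw [ih _ (fun j hj => hjs j (by simp [hj]))]
      refine pvMat_congr n _ _ (fun p q _ _ _ _ => ?_)
      by_cases h1 : (p = i ∧ q ∈ j0 :: js) ∨ (q = i ∧ p ∈ j0 :: js)
      · rw [if_pos h1]
        simp only [List.mem_cons] at h1
        by_cases h2 : (p = i ∧ q ∈ js) ∨ (q = i ∧ p ∈ js)
        · rw [if_pos h2]
        · rw [if_neg h2]
          have : (p = j0 ∧ q = i) ∨ (p = i ∧ q = j0) := by tauto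
          rcases this with h | h <;> simp [h.1, h.2]
      · rw [if_neg h1]
        simp only [List.mem_cons] at h1
        rw [if_neg (by tauto)]
        rw [if_neg (by tauto), if_neg (by tauto)]

theorem pvOuter (n : Int) (is js : List Int) (f : Int → Int → Int)
    (his : ∀ i ∈ is, 0 ≤ i ∧ i < n) (hjs : ∀ j ∈ js, 0 ≤ j ∧ j < n) :
    is.foldl (fun m i =>
        js.foldl (fun m j =>
          let m := PySem.List.pySetD m i (PySem.List.pySetD (PySem.List.pyGetD m i []) j 1)
          PySem.List.pySetD m j (PySem.List.pySetD (PySem.List.pyGetD m j []) i 1)) m) (pvMat n f)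
      = pvMat n (fun p q => if (p ∈ is ∧ q ∈ js) ∨ (q ∈ is ∧ p ∈ js) then 1 else f p q) := by
  induction is generalizing f with
  | nil => simp [pvMat]
  | cons i0 is ih =>
      obtain ⟨hi0, hi0n⟩ := his i0 (by simp)
      simp only [List.foldl_cons]
      rw [pvInner n i0 js f hi0 hi0n hjs]
      rw [ih _ (fun i hi => his i (by simp [hi]))]
      refine pvMat_congr n _ _ (fun p q _ _ _ _ => ?_)
      simp only [List.mem_cons]
      by_cases h1 : (p = i0 ∨ p ∈ is) ∧ q ∈ js ∨ (q = i0 ∨ q ∈ is) ∧ p ∈ js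
      · rw [if_pos h1]
        by_cases h2 : (p ∈ is ∧ q ∈ js) ∨ (q ∈ is ∧ p ∈ js)
        · rw [if_pos h2]
        · rw [if_neg h2, if_pos (by tauto)]
      · rw [if_neg h1, if_neg (by tauto), if_neg (by tauto)]

theorem pvRow_block (n L1 : Int) (a b : Int) (hL0 : 0 ≤ L1) (hLn : L1 ≤ n) :
    (PySem.List.pyRange 0 n 1).map (fun q => if q < L1 then a else b)
      = List.replicate L1.toNat a ++ List.replicate (n - L1).toNat b := by
  rw [PySem.List.pyRange_one_append 0 L1 n hL0 hLn, List.map_append]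
  congr 1
  · rw [List.map_congr_left (g := fun _ => a)
      (fun q hq => by rw [PySem.List.mem_pyRange_one] at hq; simp [hq.2])]
    rw [List.map_const', PySem.List.length_pyRange_one]
    congr 1; omega
  · rw [List.map_congr_left (g := fun _ => b)
      (fun q hq => by rw [PySem.List.mem_pyRange_one] at hq; simp [not_lt.mpr hq.1])]
    rw [List.map_const', PySem.List.length_pyRange_one]

theorem pvAlt_eq_mat (swSum : Int) (hpos : 0 < swSum) :
    genSpineLeaf_alt swSum
      = pvMat swSum (fun p q =>
          if (p < PySem.Int.truncdiv swSum 3 ∧ ¬ q < PySem.Int.truncdiv swSum 3)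
             ∨ (q < PySem.Int.truncdiv swSum 3 ∧ ¬ p < PySem.Int.truncdiv swSum 3) then 1 else 0) := by
  unfold genSpineLeaf_alt pvMat
  simp only []
  set L1 := PySem.Int.truncdiv swSum 3 with hL1
  have hL0 : 0 ≤ L1 := Int.tdiv_nonneg (le_of_lt hpos) (by norm_num)
  have hLn : L1 ≤ swSum := le_trans (Int.tdiv_le_self _ (le_of_lt hpos)) (le_refl _)
  refine List.map_congr_left (fun p hp => ?_)
  by_cases hpL : p < L1
  · rw [if_pos hpL, ← pvRow_block swSum L1 0 1 hL0 hLn]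
    refine (List.map_congr_left (fun q _ => ?_)).symm
    by_cases hq : q < L1 <;> simp [hq, hpL]
  · rw [if_neg hpL, ← pvRow_block swSum L1 1 0 hL0 hLn]
    refine (List.map_congr_left (fun q _ => ?_)).symm
    by_cases hq : q < L1 <;> simp [hq, hpL]

-- ===== VERDICT (by name: the statement is the Claim_ definition above) =====
theorem genSpineLeaf_spec : Claim_equal_genSpineLeaf := by
  intro swSum _
  unfold Spec_genSpineLeaf
  by_cases hpos : 0 < swSum
  · have hL0 : 0 ≤ PySem.Int.truncdiv swSum 3 := Int.tdiv_nonneg (le_of_lt hpos) (by norm_num)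
    have hLn : PySem.Int.truncdiv swSum 3 ≤ swSum := Int.tdiv_le_self _ (le_of_lt hpos)
    unfold genSpineLeaf
    simp only []
    have hinit : (PySem.List.pyRange 0 swSum 1).map
        (fun _ => (PySem.List.pyRange 0 swSum 1).map (fun _ => (0 : Int)))
        = pvMat swSum (fun _ _ => 0) := rfl
    rw [hinit]
    rw [pvOuter swSum (PySem.List.pyRange 0 (PySem.Int.truncdiv swSum 3) 1)
        (PySem.List.pyRange (PySem.Int.truncdiv swSum 3) swSum 1) (fun _ _ => 0)
        (fun i hi => by rw [PySem.List.mem_pyRange_one] at hi; exact ⟨hi.1, lt_of_lt_of_le hi.2 hLn⟩)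
        (fun j hj => by rw [PySem.List.mem_pyRange_one] at hj; exact ⟨le_trans hL0 hj.1, hj.2⟩)]
    rw [pvAlt_eq_mat swSum hpos]
    refine pvMat_congr swSum _ _ (fun p q hp0 hpn hq0 hqn => ?_)
    simp only [PySem.List.mem_pyRange_one]
    by_cases hp : p < PySem.Int.truncdiv swSum 3 <;>
      by_cases hq : q < PySem.Int.truncdiv swSum 3 <;>
      simp [hp, hq] <;> omega
  · -- swSum ≤ 0: both matrices are empty
    have hpos' : swSum ≤ 0 := by omega
    have hL : PySem.Int.truncdiv swSum 3 ≤ 0 := by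
      have h2 := @Int.tdiv_nonneg (-swSum) 3 (by omega) (by norm_num)
      rw [Int.neg_tdiv] at h2
      simp only [PySem.Int.truncdiv]
      omega
    unfold genSpineLeaf genSpineLeaf_alt
    simp only []
    rw [PySem.List.pyRange_one_eq_nil hpos', PySem.List.pyRange_one_eq_nil hL]
    simp
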